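-- pv_equiv track=rewrite | github.com/RyanPioneer/Leetcode | 2501~3000/2522. Partition String Into Substrings With Values at Most K/main.py | minimumPartition
-- ===== SOURCE A (Python) =====
-- def minimumPartition(s: str, k: int) -> int:
--     dp, sz = [1 for _ in range(len(s) + 1)], len(s)
--     bit, dp[0] = len(str(k)), 0
--     if bit == 1:
--         for i in range(sz):
--             if int(s[i]) > k:
--                 return -1
--         return sz
--
--     for i in range(bit, sz + 1):
--         if int(s[i-bit: i]) <= k:
--             dp[i] = dp[i-bit]+1
--         else:
--             dp[i] = dp[i-bit+1]+1
--
--     return dp[sz]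
-- ===== SOURCE B (Python) =====
-- def minimumPartition(s: str, k: int) -> int:
--     # Pointer-and-counter greedy scan instead of a dp table (same chunk logic, O(1) extra space).
--     bit = len(str(k))
--     if bit == 1:
--         for c in s:
--             if int(c) > k:
--                 return -1
--         return len(s)
--     i, count = len(s), 0
--     while i >= bit:
--         if int(s[i - bit:i]) <= k:
--             i -= bit
--         else:
--             i -= bit - 1
--         count += 1
--     return count if i == 0 else count + 1
-- ===== Notes on version B (the rewrite author's own statement) =====
-- stated objective: simpler
-- what changed: Replaces A's O(n)-space dp table over all prefix lengths by a single backward pointer-and-counter greedy scan that follows only the chunk chain actually reached (same bit = len(str(k)) chunk logic and the verbatim bit == 1 branch).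
import Mathlib
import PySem

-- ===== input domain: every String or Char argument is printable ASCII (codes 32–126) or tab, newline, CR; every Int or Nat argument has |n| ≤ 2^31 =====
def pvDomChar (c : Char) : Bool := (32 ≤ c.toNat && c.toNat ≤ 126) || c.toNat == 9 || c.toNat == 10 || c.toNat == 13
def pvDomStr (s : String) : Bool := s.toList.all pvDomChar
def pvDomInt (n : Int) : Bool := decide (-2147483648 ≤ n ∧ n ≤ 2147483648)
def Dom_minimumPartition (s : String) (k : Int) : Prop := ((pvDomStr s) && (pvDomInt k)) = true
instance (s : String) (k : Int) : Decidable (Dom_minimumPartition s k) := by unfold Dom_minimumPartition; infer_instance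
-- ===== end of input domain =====

-- B replaces A's dp table by a single backward pointer-and-counter greedy scan (same chunk logic, no array); objective: simpler.

-- int(s[a:a+len]) of an in-range window, as both Pythons compute it on admitted inputs
-- (Python raises exactly where ofChars? is none; Pre_ excludes those inputs, so the getD default is never relevant there).
def pvVal (l : List Char) (a len : Nat) : Int := (PySem.Int.ofChars? ((l.drop a).take len)).getD 0

-- int(c) for a single character (only evaluated in the bit == 1 branch)
def pvCharVal (c : Char) : Int := (PySem.Int.ofChars? [c]).getD 0

-- ===== PORT A =====
def minimumPartition (s : String) (k : Int) : Int :=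
  let l := s.toList
  let sz := l.length
  let bit := (PySem.Int.toChars k).length   -- bit = len(str(k)); cf. PySem.Int.toList_toStr
  let dp := (List.replicate (sz + 1) (1 : Int)).set 0 0   -- dp = [1]*(sz+1); dp[0] = 0
  if bit = 1 then
    -- for i in range(sz): if int(s[i]) > k: return -1 / after the loop: return sz
    if l.any (fun c => pvCharVal c > k) then -1 else (sz : Int)
  else
    -- for i in range(bit, sz + 1): dp[i] = dp[i-bit]+1 if int(s[i-bit:i]) <= k else dp[i-bit+1]+1
    let dp := (List.range' bit (sz + 1 - bit)).foldl
      (fun dp i =>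
        if pvVal l (i - bit) bit ≤ k then dp.set i (dp.getD (i - bit) 0 + 1)
        else dp.set i (dp.getD (i - bit + 1) 0 + 1)) dp
    dp.getD sz 0

-- ===== PORT B =====
-- while i >= bit: move i down by bit or bit-1, count += 1; afterwards count (+1 unless i == 0).
-- The conjunct 2 ≤ bit in the guard is a totality guard only (the loop is only entered with bit ≥ 2).
def pvScan (l : List Char) (k : Int) (bit : Nat) (i : Nat) (count : Int) : Int :=
  if h : bit ≤ i ∧ 2 ≤ bit then
    if pvVal l (i - bit) bit ≤ k then pvScan l k bit (i - bit) (count + 1)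
    else pvScan l k bit (i - (bit - 1)) (count + 1)
  else if i = 0 then count else count + 1
termination_by i
decreasing_by all_goals omega

def minimumPartition_alt (s : String) (k : Int) : Int :=
  let l := s.toList
  let sz := l.length
  let bit := (PySem.Int.toChars k).length
  if bit = 1 then
    if l.any (fun c => pvCharVal c > k) then -1 else (sz : Int)
  else
    pvScan l k bit sz 0

-- ===== PRECONDITION & SPEC =====
-- Pre_ holds exactly where the Python A returns normally (elsewhere int() raises ValueError): with
-- bit == 1, either every character is int()-parseable (a digit) or a digit > k occurs before the first
-- unparseable character (A returns -1 before reaching it); with bit ≥ 2, every window s[i-bit:i] that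
-- the dp loop feeds to int() parses.
def Pre_minimumPartition (s : String) (k : Int) : Prop :=
  let l := s.toList
  let bit := (PySem.Int.toChars k).length
  if bit = 1 then
    (∀ c ∈ l, (PySem.Int.ofChars? [c]).isSome) ∨
    (∃ c ∈ l.takeWhile (fun c => (PySem.Int.ofChars? [c]).isSome), (PySem.Int.ofChars? [c]).getD 0 > k)
  else
    ∀ i ∈ List.range' bit (l.length + 1 - bit), (PySem.Int.ofChars? ((l.drop (i - bit)).take bit)).isSome
instance (s : String) (k : Int) : Decidable (Pre_minimumPartition s k) := by
  unfold Pre_minimumPartition; infer_instance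

def pvWitness_minimumPartition : String × Int := ("2345", 10)

def Spec_minimumPartition (s : String) (k : Int) (out : Int) : Prop := out = minimumPartition_alt s k
instance (s : String) (k : Int) (out : Int) : Decidable (Spec_minimumPartition s k out) := by unfold Spec_minimumPartition; infer_instance

-- ===== CLAIM (what is proved, stated in full; the proofs are below) =====
def Claim_equal_minimumPartition : Prop := ∀ (s : String) (k : Int), Dom_minimumPartition s k → Pre_minimumPartition s k → Spec_minimumPartition s k (minimumPartition s k)

-- ===== LEMMAS AND PROOFS =====

-- pvScan with the accumulator stripped off: the amount B's loop adds when started at position i.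
def pvG (l : List Char) (k : Int) (bit : Nat) (i : Nat) : Int :=
  if h : bit ≤ i ∧ 2 ≤ bit then
    (if pvVal l (i - bit) bit ≤ k then pvG l k bit (i - bit) else pvG l k bit (i - (bit - 1))) + 1
  else if i = 0 then 0 else 1
termination_by i
decreasing_by all_goals omega

theorem pvScan_eq_add_pvG (l : List Char) (k : Int) (bit : Nat) :
    ∀ i count, pvScan l k bit i count = count + pvG l k bit i := by
  intro i
  induction i using Nat.strong_induction_on with
  | _ i ih =>
    intro count
    rw [pvScan, pvG]
    split
    · rename_i h
      split
      · rw [ih (i - bit) (by omega)]; ring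
      · rw [ih (i - (bit - 1)) (by omega)]; ring
    · split <;> ring

theorem pvG_lt (l : List Char) (k : Int) (bit j : Nat) (hj : ¬ bit ≤ j) :
    pvG l k bit j = if j = 0 then 0 else 1 := by
  rw [pvG, dif_neg (by omega)]

-- the initial list dp = [1]*(sz+1); dp[0] = 0, read at j ≤ sz
theorem pvInit_getD (len j : Nat) (hj : j ≤ len) :
    ((List.replicate (len + 1) (1 : Int)).set 0 0).getD j 0 = if j = 0 then 0 else 1 := by
  rcases Nat.eq_zero_or_pos j with h0 | h0
  · subst h0
    simp [List.getD_eq_getElem?_getD]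
  · rw [List.getD_eq_getElem?_getD, List.getElem?_set_ne (by omega)]
    rw [List.getElem?_replicate, if_pos (by omega)]
    simp
    omega

-- the dp-fold invariant: after processing range' bit n, every entry below bit + n holds pvG,
-- every later entry still holds its initial value
theorem pvFold_inv (l : List Char) (k : Int) (bit : Nat) (hb : 2 ≤ bit) :
    ∀ n, bit + n ≤ l.length + 1 →
      ((List.range' bit n).foldl
        (fun dp i =>
          if pvVal l (i - bit) bit ≤ k then dp.set i (dp.getD (i - bit) 0 + 1)
          else dp.set i (dp.getD (i - bit + 1) 0 + 1))
        ((List.replicate (l.length + 1) (1 : Int)).set 0 0)).length = l.length + 1 ∧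
      ∀ j ≤ l.length,
        ((List.range' bit n).foldl
          (fun dp i =>
            if pvVal l (i - bit) bit ≤ k then dp.set i (dp.getD (i - bit) 0 + 1)
            else dp.set i (dp.getD (i - bit + 1) 0 + 1))
          ((List.replicate (l.length + 1) (1 : Int)).set 0 0)).getD j 0 =
          if j < bit + n then pvG l k bit j else (if j = 0 then 0 else 1) := by
  intro n
  induction n with
  | zero =>
    intro _
    refine ⟨by simp [List.range'_zero], ?_⟩
    intro j hj
    rw [List.range'_zero, List.foldl_nil, pvInit_getD l.length j hj]
    by_cases hjb : j < bit + 0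
    · rw [if_pos hjb, pvG_lt l k bit j (by omega)]
    · rw [if_neg hjb]
  | succ n ih =>
    intro hn
    obtain ⟨hlen, hval⟩ := ih (by omega)
    rw [List.range'_concat, List.foldl_append, List.foldl_cons, List.foldl_nil]
    simp only [Nat.one_mul] at *
    set F := fun (dp : List Int) (i : Nat) =>
      if pvVal l (i - bit) bit ≤ k then dp.set i (dp.getD (i - bit) 0 + 1)
      else dp.set i (dp.getD (i - bit + 1) 0 + 1) with hF
    set dpn := (List.range' bit n).foldl F ((List.replicate (l.length + 1) (1 : Int)).set 0 0) with hdpn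
    have hread1 : dpn.getD n 0 = pvG l k bit n := by
      have := hval n (by omega)
      rwa [if_pos (by omega)] at this
    have hread2 : dpn.getD (n + 1) 0 = pvG l k bit (n + 1) := by
      have := hval (n + 1) (by omega)
      rwa [if_pos (by omega)] at this
    have e1 : bit + n - bit = n := by omega
    have hwrite : (if pvVal l (bit + n - bit) bit ≤ k
          then dpn.set (bit + n) (dpn.getD (bit + n - bit) 0 + 1)
          else dpn.set (bit + n) (dpn.getD (bit + n - bit + 1) 0 + 1))
        = dpn.set (bit + n) (pvG l k bit (bit + n)) := by
      rw [e1]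
      rw [pvG, dif_pos (⟨by omega, hb⟩ : bit ≤ bit + n ∧ 2 ≤ bit)]
      have e2 : bit + n - (bit - 1) = n + 1 := by omega
      rw [e1, e2]
      split
      · rw [hread1]
      · rw [hread2]
    rw [hwrite]
    constructor
    · rw [List.length_set, hlen]
    · intro j hj
      by_cases hji : j = bit + n
      · subst hji
        rw [List.getD_eq_getElem?_getD,
            List.getElem?_set_self (by rw [hlen]; omega)]
        simp only [Option.getD_some]
        rw [if_pos (by omega)]
      · rw [List.getD_eq_getElem?_getD, List.getElem?_set_ne (by omega),
            ← List.getD_eq_getElem?_getD, hval j hj]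
        by_cases hjb : j < bit + n
        · rw [if_pos hjb, if_pos (by omega)]
        · rw [if_neg hjb, if_neg (by omega : ¬ j = 0), if_neg (by omega : ¬ j < bit + (n + 1))]

theorem pvBit_pos (k : Int) : 0 < (PySem.Int.toChars k).length := by
  unfold PySem.Int.toChars
  split
  · simp
  · exact Nat.length_toDigits_pos

-- ===== VERDICT (by name: the statement is the Claim_ definition above) =====
theorem minimumPartition_spec : Claim_equal_minimumPartition := by
  intro s k _ _
  unfold Spec_minimumPartition minimumPartition minimumPartition_alt
  simp only []
  by_cases hbit : (PySem.Int.toChars k).length = 1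
  · rw [if_pos hbit, if_pos hbit]
  · rw [if_neg hbit, if_neg hbit]
    have hb : 2 ≤ (PySem.Int.toChars k).length := by
      have := pvBit_pos k; omega
    set bit := (PySem.Int.toChars k).length with hbdef
    set l := s.toList with hldef
    rw [pvScan_eq_add_pvG, zero_add]
    by_cases hsmall : bit ≤ l.length + 1
    · obtain ⟨_, hval⟩ := pvFold_inv l k bit hb (l.length + 1 - bit) (by omega)
      have := hval l.length (le_refl _)
      rw [if_pos (by omega)] at this
      exact this
    · have e : l.length + 1 - bit = 0 := by omega
      rw [e, List.range'_zero, List.foldl_nil,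
          pvInit_getD l.length l.length (le_refl _),
          pvG_lt l k bit l.length (by omega)]
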